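-- pv_equiv track=rewrite | github.com/XinnuoXu/AggGen | data_e2e/get_rst.py | clean_tree
-- ===== SOURCE A (Python) =====
-- def label_classify(item):
--     if item[0] == '(':
--         if item[1] == 'F':
--             return "fact"
--         else:
--             return "phrase"
--     elif item[0] == ')':
--         return "end"
--     elif item[0] == '*':
--         return "reference"
--     return "token"
--
-- def clean_tree(tree):
--     ctree = []; idx = 0
--     label_stack = []
--     while idx < len(tree):
--         tok = tree[idx]
--         cls = label_classify(tok)
--         if cls == "fact":
--             label_stack.append(cls)
--             ctree.append(tok)
--         elif cls == "phrase":
--             label_stack.append(cls)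
--             ctree.append(tok)
--         elif cls == "end":
--             pop_cls = label_stack.pop()
--             ctree.append(tok)
--         elif cls == "token":
--             if len(label_stack) > 0 and label_stack[-1] == 'fact':
--                 j = len(ctree) - 1
--                 while j >= 0:
--                     if ctree[j] != ')':
--                         break
--                     j -= 1
--                 ctree.insert(j+1, tok)
--             else:
--                 ctree.append(tok)
--         idx += 1
--     return ctree
-- ===== SOURCE B (Python) =====
-- def clean_tree(tree):
--     # O(n): keep the output as `body` plus a counted run of trailing ')' tokens,
--     # so inserting a fact-token before the trailing close-parens is an O(1) append.
--     body = []
--     close_run = 0          # number of ')' tokens pending at the end of the output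
--     fact_stack = []        # True = inside a fact label, False = phrase
--     for tok in tree:
--         c = tok[0]
--         if c == '(':
--             if close_run:
--                 body.extend([')'] * close_run)
--                 close_run = 0
--             body.append(tok)
--             fact_stack.append(tok[1] == 'F')
--         elif c == ')':
--             fact_stack.pop()
--             if tok == ')':
--                 close_run += 1
--             else:
--                 if close_run:
--                     body.extend([')'] * close_run)
--                     close_run = 0
--                 body.append(tok)
--         elif c == '*':
--             pass
--         else:
--             if fact_stack and fact_stack[-1]:
--                 body.append(tok)
--             else:
--                 if close_run:
--                     body.extend([')'] * close_run)
--                     close_run = 0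
--                 body.append(tok)
--     body.extend([')'] * close_run)
--     return body
-- ===== Notes on version B (the rewrite author's own statement) =====
-- stated objective: faster
-- what changed: Instead of re-scanning the output backwards over the trailing ')' run and calling list.insert (O(n) each) for every token inside a fact, B keeps the output as a body list plus a counted run of trailing ')' tokens (and a boolean stack), so every step is an amortized O(1) append.
import Mathlib
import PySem

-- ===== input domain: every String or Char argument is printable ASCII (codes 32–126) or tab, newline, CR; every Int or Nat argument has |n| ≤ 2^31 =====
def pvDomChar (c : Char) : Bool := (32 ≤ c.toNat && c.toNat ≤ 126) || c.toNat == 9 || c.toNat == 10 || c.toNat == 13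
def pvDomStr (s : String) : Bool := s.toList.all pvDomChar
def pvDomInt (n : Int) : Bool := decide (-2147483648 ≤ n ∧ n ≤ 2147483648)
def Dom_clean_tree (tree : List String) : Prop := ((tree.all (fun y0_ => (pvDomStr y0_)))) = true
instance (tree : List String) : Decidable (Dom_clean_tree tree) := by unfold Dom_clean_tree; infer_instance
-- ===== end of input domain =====

-- B replaces A's quadratic backwards-rescan-and-insert with a body list plus a counted
-- trailing-')' run, making every step an amortized O(1) append (return value only; neither mutates its argument).
-- Python stacks (append/pop/[-1] at the right end) are transliterated as Lean lists used at the head (cons/tail/head).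

-- ===== PORT A =====
def label_classify (item : String) : String :=
  if PySem.List.pyGet? item.toList 0 = some '(' then
    if PySem.List.pyGet? item.toList 1 = some 'F' then "fact" else "phrase"
  else if PySem.List.pyGet? item.toList 0 = some ')' then "end"
  else if PySem.List.pyGet? item.toList 0 = some '*' then "reference"
  else "token"

-- the inner `while j >= 0: if ctree[j] != ')': break; j -= 1`; fuel = ctree.length bounds the iterations
def scanLoopA (ctree : List String) (j : Int) : Nat → Int
  | 0 => j
  | fuel + 1 =>
    if j ≥ 0 then
      if PySem.List.pyGetD ctree j "" ≠ ")" then j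
      else scanLoopA ctree (j - 1) fuel
    else j

def cleanLoopA : List String → List String → List String → List String
  | [], ctree, _ => ctree
  | tok :: rest, ctree, stk =>
    let cls := label_classify tok
    if cls = "fact" then cleanLoopA rest (ctree ++ [tok]) (cls :: stk)
    else if cls = "phrase" then cleanLoopA rest (ctree ++ [tok]) (cls :: stk)
    else if cls = "end" then cleanLoopA rest (ctree ++ [tok]) stk.tail
    else if cls = "token" then
      if stk.headD "" = "fact" then
        let j := scanLoopA ctree ((ctree.length : Int) - 1) ctree.length
        cleanLoopA rest (PySem.List.insert ctree (j + 1) tok) stk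
      else cleanLoopA rest (ctree ++ [tok]) stk
    else cleanLoopA rest ctree stk

def clean_tree (tree : List String) : List String := cleanLoopA tree [] []

-- ===== PORT B =====
def cleanLoopB : List String → List String → Nat → List Bool → List String
  | [], body, run, _ => body ++ List.replicate run ")"
  | tok :: rest, body, run, fstk =>
    let c := PySem.List.pyGet? tok.toList 0
    if c = some '(' then
      cleanLoopB rest (body ++ List.replicate run ")" ++ [tok]) 0
        ((PySem.List.pyGet? tok.toList 1 == some 'F') :: fstk)
    else if c = some ')' then
      if tok = ")" then cleanLoopB rest body (run + 1) fstk.tail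
      else cleanLoopB rest (body ++ List.replicate run ")" ++ [tok]) 0 fstk.tail
    else if c = some '*' then cleanLoopB rest body run fstk
    else
      if fstk.headD false then cleanLoopB rest (body ++ [tok]) run fstk
      else cleanLoopB rest (body ++ List.replicate run ")" ++ [tok]) 0 fstk

def clean_tree_alt (tree : List String) : List String := cleanLoopB tree [] 0 []

-- ===== PRECONDITION & SPEC =====
def pvIsOpen (t : String) : Bool := t.toList.head? == some '('
def pvIsClose (t : String) : Bool := t.toList.head? == some ')'
-- A (and B) raise IndexError on an empty-string token, on a bare "(" token of length 1,
-- and when a ')'-token arrives with no open label on the stack; Pre_ excludes exactly those.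
def Pre_clean_tree (tree : List String) : Prop :=
  (∀ t ∈ tree, t.toList ≠ [] ∧ (pvIsOpen t = true → 2 ≤ t.toList.length)) ∧
  (∀ n ∈ List.range (tree.length + 1),
      (tree.take n).countP pvIsClose ≤ (tree.take n).countP pvIsOpen)
instance (tree : List String) : Decidable (Pre_clean_tree tree) := by unfold Pre_clean_tree; infer_instance
def pvWitness_clean_tree : List String := ["(F1", "(good", "a", ")", "b", ")"]
def Spec_clean_tree (tree : List String) (out : List String) : Prop := out = clean_tree_alt tree
instance (tree : List String) (out : List String) : Decidable (Spec_clean_tree tree out) := by unfold Spec_clean_tree; infer_instance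

-- ===== CLAIM (what is proved, stated in full; the proofs are below) =====
def Claim_equal_clean_tree : Prop := ∀ (tree : List String), Dom_clean_tree tree → Pre_clean_tree tree → Spec_clean_tree tree (clean_tree tree)

-- ===== LEMMAS AND PROOFS =====
theorem getD_app_last (b : String) (bs tail : List String) :
    ((b :: bs) ++ tail).getD bs.length "" = ((b :: bs).getLast?).getD "" := by
  rw [List.getD, List.getElem?_append_left (by simp), List.getLast?_eq_getElem?]
  simp

theorem scan_general (run : Nat) : ∀ (body tail : List String), body.getLast? ≠ some ")" →
    scanLoopA (body ++ List.replicate run ")" ++ tail) ((body.length + run : Int) - 1) (body.length + run)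
      = (body.length : Int) - 1 := by
  induction run with
  | zero =>
    intro body tail h
    match body with
    | [] => simp [scanLoopA]
    | b :: bs =>
      have hx : (b :: bs).length + 0 = bs.length + 1 := by simp
      rw [hx, scanLoopA, if_pos (by push_cast; omega)]
      have hi : ((b :: bs).length : Int) + (0 : Nat) - 1 = ((bs.length : Nat) : Int) := by
        push_cast; omega
      rw [hi, PySem.List.pyGetD_natCast]
      simp only [List.replicate, List.append_nil]
      rw [getD_app_last]
      have : (b :: bs).getLast?.getD "" ≠ ")" := by
        cases hg : (b :: bs).getLast? with
        | none => simp at hg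
        | some v => rw [hg] at h; simpa using fun he => h (by rw [he])
      rw [if_pos this]
      simp only [List.length_cons]; push_cast; omega
  | succ n ih =>
    intro body tail h
    have hx : body.length + (n + 1) = (body.length + n) + 1 := by omega
    rw [hx, scanLoopA, if_pos (by push_cast; omega)]
    have hi : ((body.length : Int) + ((n+1 : Nat) : Int) - 1) = (((body.length + n : Nat)) : Int) := by
      push_cast; omega
    have hct : body ++ List.replicate (n+1) ")" ++ tail
        = (body ++ List.replicate n ")") ++ (")" :: tail) := by
      rw [List.replicate_succ']; simp
    rw [hi, PySem.List.pyGetD_natCast, hct]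
    have hget : ((body ++ List.replicate n ")") ++ (")" :: tail)).getD (body.length + n) "" = ")" := by
      rw [List.getD, List.getElem?_append_right (by simp), ]
      simp
    rw [hget, if_neg (by simp)]
    have hj : ((body.length : Int) + ((n+1:Nat) : Int) - 1 - 1) = ((body.length : Int) + n - 1) := by
      push_cast; omega
    have h2 := ih body (")" :: tail) h
    rw [show (((body.length + n : Nat)) : Int) - 1 = (body.length : Int) + (n:Int) - 1 by push_cast; ring]
    exact h2

theorem tok_ne_rparen (tok : String) (h : PySem.List.pyGet? tok.toList 0 ≠ some ')') : tok ≠ ")" := by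
  intro he; subst he; exact h rfl

theorem insert_at_body (body : List String) (run : Nat) (tok : String)
    (h : body.getLast? ≠ some ")") :
    PySem.List.insert (body ++ List.replicate run ")")
      (scanLoopA (body ++ List.replicate run ")")
        ((body ++ List.replicate run ")").length - 1) (body ++ List.replicate run ")").length + 1)
      tok
    = (body ++ [tok]) ++ List.replicate run ")" := by
  have hs := scan_general run body [] h
  rw [List.append_nil] at hs
  rw [show ((((body ++ List.replicate run ")").length : Int)) - 1) = ((body.length : Int) + run - 1) by
        push_cast [List.length_append, List.length_replicate]; ring,
      show (body ++ List.replicate run ")").length = body.length + run by simp,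
      hs,
      show ((body.length : Int) - 1 + 1) = ((body.length : Nat) : Int) by ring,
      PySem.List.insert_natCast _ _ _ (by simp),
      List.take_left, List.drop_left]
  simp

theorem loops_eq (ts : List String) : ∀ (body : List String) (run : Nat) (fstk : List Bool),
    body.getLast? ≠ some ")" →
    cleanLoopA ts (body ++ List.replicate run ")") (fstk.map (fun b => if b then "fact" else "phrase"))
      = cleanLoopB ts body run fstk := by
  induction ts with
  | nil => intro body run fstk h; rfl
  | cons tok rest ih =>
    intro body run fstk h
    rw [cleanLoopA, cleanLoopB]
    by_cases h1 : PySem.List.pyGet? tok.toList 0 = some '('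
    · have hne : tok ≠ ")" := tok_ne_rparen tok (by rw [h1]; simp)
      have h' : (body ++ List.replicate run ")" ++ [tok]).getLast? ≠ some ")" := by
        simp [hne]
      by_cases hF : PySem.List.pyGet? tok.toList 1 = some 'F'
      · simp only [label_classify, h1, hF, reduceIte]
        have := ih (body ++ List.replicate run ")" ++ [tok]) 0 (true :: fstk) h'
        simpa using this
      · have hb : (PySem.List.pyGet? tok.toList 1 == some 'F') = false := beq_eq_false_iff_ne.mpr hF
        simp only [label_classify, h1, hF, reduceIte, hb,
          show ¬ ("phrase" = "fact") by decide]
        have := ih (body ++ List.replicate run ")" ++ [tok]) 0 (false :: fstk) h'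
        simpa using this
    · by_cases h2 : PySem.List.pyGet? tok.toList 0 = some ')'
      · simp only [label_classify, h2, reduceIte]
        by_cases htok : tok = ")"
        · subst htok
          rw [if_pos rfl]
          have := ih body (run + 1) fstk.tail h
          rw [List.replicate_succ', ← List.append_assoc] at this
          simpa [List.map_tail] using this
        · rw [if_neg htok]
          have h' : (body ++ List.replicate run ")" ++ [tok]).getLast? ≠ some ")" := by simp [htok]
          have := ih (body ++ List.replicate run ")" ++ [tok]) 0 fstk.tail h'
          simpa [List.map_tail] using this
      · by_cases h3 : PySem.List.pyGet? tok.toList 0 = some '*'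
        · simp only [label_classify, h3, reduceIte]
          exact ih body run fstk h
        · have hne : tok ≠ ")" := tok_ne_rparen tok h2
          have h' : (body ++ List.replicate run ")" ++ [tok]).getLast? ≠ some ")" := by simp [hne]
          simp only [label_classify, h1, h2, h3, reduceIte]
          match fstk with
          | [] =>
            simp only [List.map_nil, List.headD_nil]
            have := ih (body ++ List.replicate run ")" ++ [tok]) 0 [] h'
            simpa using this
          | true :: bs =>
            simp only [List.map_cons, List.headD_cons, reduceIte]
            rw [insert_at_body body run tok h]
            have h'' : (body ++ [tok]).getLast? ≠ some ")" := by simp [hne]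
            have := ih (body ++ [tok]) run (true :: bs) h''
            simpa using this
          | false :: bs =>
            simp only [List.map_cons, List.headD_cons]
            have := ih (body ++ List.replicate run ")" ++ [tok]) 0 (false :: bs) h'
            simpa using this

theorem clean_eq (tree : List String) : clean_tree tree = clean_tree_alt tree := by
  have := loops_eq tree [] 0 []
  simpa [clean_tree, clean_tree_alt] using this

-- ===== VERDICT (by name: the statement is the Claim_ definition above) =====
theorem clean_tree_spec : Claim_equal_clean_tree := fun tree _ _ => clean_eq tree
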